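-- pv_equiv track=rewrite | github.com/Maciej1407/MRes-Submission | Code/Analysis Code/JsonPostProcessing/process_json_cli.py | extract_rate_tokens
-- ===== SOURCE A (Python) =====
-- def extract_rate_tokens(param_key: str):
--     """
--     Return the exact rate tokens as strings as they appear in the param key,
--     preserving formatting (e.g., '0.001', not float-str()).
--     Also returns a boolean that mirrors the 'single' flag logic:
--     - True  → heterogeneous (two groups expected)
--     - False → homogeneous/single (one group)
--     """
--     f_tok = None
--     s_tok = None
--     is_het = True
--     for part in param_key.split("__"):
--         if part.startswith("fR:"):
--             f_tok = part.split(":", 1)[1]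
--         elif part.startswith("sR:"):
--             if "single" in part:
--                 is_het = False
--             else:
--                 s_tok = part.split(":", 1)[1]
--     tokens = [t for t in (f_tok, s_tok) if t is not None]
--     return tokens, is_het
-- ===== SOURCE B (Python) =====
-- def extract_rate_tokens(param_key: str):
--     parts = param_key.split("__")
--
--     def tail(p):
--         return p.split(":", 1)[1]
--
--     f_tok = next((tail(p) for p in reversed(parts) if p.startswith("fR:")), None)
--     is_het = not any(p.startswith("sR:") and "single" in p for p in parts)
--     s_tok = next((tail(p) for p in reversed(parts)
--                   if p.startswith("sR:") and "single" not in p), None)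
--     return [t for t in (f_tok, s_tok) if t is not None], is_het
-- ===== Notes on version B (the rewrite author's own statement) =====
-- stated objective: alternative
-- what changed: A's single stateful loop carrying (f_tok, s_tok, is_het) is replaced by splitting once and deriving each value with its own independent pass: a reversed-order find for each rate token (last occurrence wins) and an any-scan for the 'single' flag.
import Mathlib
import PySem

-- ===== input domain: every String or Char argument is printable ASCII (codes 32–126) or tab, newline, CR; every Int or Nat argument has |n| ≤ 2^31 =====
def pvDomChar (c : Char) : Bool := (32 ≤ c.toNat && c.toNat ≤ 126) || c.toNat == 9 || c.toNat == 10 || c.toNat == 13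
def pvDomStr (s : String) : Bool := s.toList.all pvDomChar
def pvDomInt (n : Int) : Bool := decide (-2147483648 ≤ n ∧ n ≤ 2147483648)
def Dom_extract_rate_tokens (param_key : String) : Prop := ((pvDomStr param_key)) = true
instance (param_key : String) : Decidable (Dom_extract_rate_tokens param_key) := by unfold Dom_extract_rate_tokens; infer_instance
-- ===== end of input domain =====

-- B replaces A's single stateful loop by independent passes over the split parts (a reversed find? for each token, any for the flag); objective: alternative decomposition, same cost.

-- shared sub-expression of both Pythons: part.split(":", 1)[1]
-- (split? never returns none here: the separator is the literal ":"; pyGetD's default is never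
--  used on reachable calls: every caller's part starts with "fR:"/"sR:", so the split has 2 pieces)
def pvSplitTail (part : String) : String :=
  PySem.List.pyGetD ((PySem.Str.splitMax? part ":" 1).getD []) 1 ""

-- ===== PORT A =====
-- literal port of A: one fold over the "__"-split carrying (f_tok, s_tok, is_het)
def extract_rate_tokens (param_key : String) : List String × Bool :=
  let r := ((PySem.Str.split? param_key "__").getD []).foldl
    (fun (st : Option String × Option String × Bool) part =>
      if PySem.Str.startswith part "fR:" then (some (pvSplitTail part), st.2.1, st.2.2)
      else if PySem.Str.startswith part "sR:" then
        if PySem.Str.isIn "single" part then (st.1, st.2.1, false)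
        else (st.1, some (pvSplitTail part), st.2.2)
      else st)
    (none, none, true)
  (([r.1, r.2.1].filterMap id), r.2.2)

-- ===== PORT B =====
-- port of Source B: parts computed once, each value derived by its own independent scan
def extract_rate_tokens_alt (param_key : String) : List String × Bool :=
  let parts := (PySem.Str.split? param_key "__").getD []
  let f_tok := (parts.reverse.find? (fun p => PySem.Str.startswith p "fR:")).map pvSplitTail
  let is_het := !(parts.any (fun p => PySem.Str.startswith p "sR:" && PySem.Str.isIn "single" p))
  let s_tok := (parts.reverse.find? (fun p =>
      PySem.Str.startswith p "sR:" && !(PySem.Str.isIn "single" p))).map pvSplitTail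
  ([f_tok, s_tok].filterMap id, is_het)

-- ===== PRECONDITION & SPEC =====
def Spec_extract_rate_tokens (param_key : String) (out : List String × Bool) : Prop := out = extract_rate_tokens_alt param_key
instance (param_key : String) (out : List String × Bool) : Decidable (Spec_extract_rate_tokens param_key out) := by unfold Spec_extract_rate_tokens; infer_instance

-- ===== CLAIM (what is proved, stated in full; the proofs are below) =====
def Claim_equal_extract_rate_tokens : Prop := ∀ (param_key : String), Dom_extract_rate_tokens param_key → Spec_extract_rate_tokens param_key (extract_rate_tokens param_key)

-- ===== LEMMAS AND PROOFS =====

-- A's fold from an arbitrary start state, expressed by B's three independent scans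
-- (abstract predicates; hx says the two prefixes are mutually exclusive)
theorem pv_foldl_char {α β : Type} (pF pS pSg : α → Bool) (fT : α → β)
    (hx : ∀ p, pF p = true → pS p = false)
    (parts : List α) (a b : Option β) (h : Bool) :
    parts.foldl (fun (st : Option β × Option β × Bool) part =>
        if pF part then (some (fT part), st.2.1, st.2.2)
        else if pS part then
          if pSg part then (st.1, st.2.1, false)
          else (st.1, some (fT part), st.2.2)
        else st) (a, b, h) =
    ( ((parts.reverse.find? pF).map fT).or a,
      ((parts.reverse.find? (fun p => pS p && !pSg p)).map fT).or b,
      h && !(parts.any (fun p => pS p && pSg p)) ) := by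
  induction parts generalizing a b h with
  | nil => simp
  | cons p rest ih =>
    simp only [List.foldl_cons, List.reverse_cons, List.find?_append, List.any_cons,
      List.find?_cons, List.find?_nil]
    by_cases h1 : pF p
    · simp [h1, hx p h1, ih]
    · by_cases h2 : pS p
      · by_cases h3 : pSg p
        · simp [h1, h2, h3, ih]
        · simp [h1, h2, h3, ih]
      · simp [h1, h2, ih]

-- a part cannot start with both "fR:" and "sR:"
theorem pv_fR_not_sR (p : String) (h : PySem.Str.startswith p "fR:" = true) :
    PySem.Str.startswith p "sR:" = false := by
  rw [PySem.Str.startswith_eq] at *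
  cases hb : PySem.Chars.startswith p.toList "sR:".toList with
  | false => rfl
  | true =>
    exfalso
    rcases (PySem.Chars.startswith_iff _ _).mp h with ⟨t1, e1⟩
    rcases (PySem.Chars.startswith_iff _ _).mp hb with ⟨t2, e2⟩
    rw [← e2] at e1
    simp at e1

-- ===== VERDICT (by name: the statement is the Claim_ definition above) =====
theorem extract_rate_tokens_spec : Claim_equal_extract_rate_tokens := by
  intro param_key _
  unfold Spec_extract_rate_tokens extract_rate_tokens extract_rate_tokens_alt
  have hr : ((PySem.Str.split? param_key "__").getD []).foldl
      (fun (st : Option String × Option String × Bool) part =>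
        if PySem.Str.startswith part "fR:" then (some (pvSplitTail part), st.2.1, st.2.2)
        else if PySem.Str.startswith part "sR:" then
          if PySem.Str.isIn "single" part then (st.1, st.2.1, false)
          else (st.1, some (pvSplitTail part), st.2.2)
        else st)
      (none, none, true) =
    ( (((((PySem.Str.split? param_key "__").getD []).reverse.find?
          (fun p => PySem.Str.startswith p "fR:")).map pvSplitTail)).or none,
      (((((PySem.Str.split? param_key "__").getD []).reverse.find?
          (fun p => PySem.Str.startswith p "sR:" && !(PySem.Str.isIn "single" p))).map pvSplitTail)).or none,
      true && !(((PySem.Str.split? param_key "__").getD []).any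
          (fun p => PySem.Str.startswith p "sR:" && PySem.Str.isIn "single" p)) ) :=
    pv_foldl_char _ _ _ _ pv_fR_not_sR _ none none true
  rw [hr]
  simp only [Option.or_none, Bool.true_and]
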